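-- pv_equiv track=rewrite | github.com/AustinJunyuLi/SEC_extract | pipeline/obligations.py | _sentence_around
-- ===== SOURCE A (Python) =====
-- import unicodedata
--
-- def _clean_quote(value: str) -> str:
--     return " ".join(unicodedata.normalize("NFKC", value).split())
--
-- def _sentence_around(text: str, start: int, end: int) -> str:
--     left_candidates = [text.rfind(mark, 0, start) for mark in (".", "\n", ";", "\u2022")]
--     left = max(left_candidates)
--     right_candidates = [
--         position for position in (
--             text.find(mark, end) for mark in (".", "\n", ";")
--         )
--         if position != -1
--     ]
--     right = min(right_candidates) if right_candidates else min(len(text), end + 500)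
--     return _clean_quote(text[left + 1:right + 1])
-- ===== SOURCE B (Python) =====
-- import unicodedata
--
-- def _clean_quote(value: str) -> str:
--     return " ".join(unicodedata.normalize("NFKC", value).split())
--
-- def _sentence_around(text: str, start: int, end: int) -> str:
--     # One backward scan over the prefix and one forward scan over the tail,
--     # instead of seven separate rfind/find passes combined with max/min.
--     n = len(text)
--     prefix = text[:start]
--     left = -1
--     for i in range(len(prefix) - 1, -1, -1):
--         if prefix[i] in ".\n;\u2022":
--             left = i
--             break
--     tail = text[end:]
--     offset = n - len(tail)
--     right = None
--     for j, ch in enumerate(tail):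
--         if ch in ".\n;":
--             right = offset + j
--             break
--     if right is None:
--         right = min(n, end + 500)
--     return _clean_quote(text[left + 1:right + 1])
-- ===== Notes on version B (the rewrite author's own statement) =====
-- stated objective: alternative
-- what changed: Replaces the four rfind + three find library scans combined with max/min over candidate lists by one backward scan over the prefix text[:start] and one forward scan over the tail text[end:], each stopping at the first boundary mark.
import Mathlib
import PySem

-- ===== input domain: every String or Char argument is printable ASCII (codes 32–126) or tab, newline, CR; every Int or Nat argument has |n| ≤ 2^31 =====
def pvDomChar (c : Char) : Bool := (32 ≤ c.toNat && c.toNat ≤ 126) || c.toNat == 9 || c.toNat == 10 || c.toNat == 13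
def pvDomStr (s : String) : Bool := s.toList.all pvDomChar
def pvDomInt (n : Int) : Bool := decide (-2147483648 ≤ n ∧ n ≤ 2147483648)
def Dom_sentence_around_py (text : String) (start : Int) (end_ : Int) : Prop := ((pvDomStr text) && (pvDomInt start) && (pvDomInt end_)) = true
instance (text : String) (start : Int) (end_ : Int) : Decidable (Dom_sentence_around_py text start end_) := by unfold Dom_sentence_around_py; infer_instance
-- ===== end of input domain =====

-- B replaces the four rfind + three find library scans (plus max/min over candidate lists) by one
-- backward scan over the prefix text[:start] and one forward scan over the tail text[end:] (objective: alternative).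

-- ===== PORT A =====
-- shared module helper _clean_quote; unicodedata.normalize("NFKC", ·) is the identity on the
-- printable-ASCII/tab/newline/CR domain, so it is ported as the identity (exact on Dom).
def pvCleanQuote (value : String) : String :=
  PySem.Str.join " " (PySem.Str.split₀ value)

def sentence_around_py (text : String) (start : Int) (end_ : Int) : String :=
  let left_candidates := [".", "\n", ";", "\u2022"].map (fun mark => PySem.Str.rfindFrom text mark 0 (some start))
  let left := (PySem.List.max? left_candidates id).getD 0  -- max() of a nonempty literal list never yields none
  let right_candidates := ([".", "\n", ";"].map (fun mark => PySem.Str.findFrom text mark end_ none)).filter (fun p => p ≠ -1)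
  let right := match PySem.List.min? right_candidates id with
               | some r => r
               | none => min (PySem.Str.len text : Int) (end_ + 500)
  pvCleanQuote (PySem.Str.slice text (some (left + 1)) (some (right + 1)))

-- ===== PORT B =====
-- backward scan 'for i in range(len(prefix)-1, -1, -1): if prefix[i] in marks: left = i; break' with left = -1 default
def pvScanL (cs : List Char) : Nat → Int
  | 0 => -1
  | j + 1 => if cs.getD j ' ' ∈ ['.', '\n', ';', '\u2022'] then (j : Int) else pvScanL cs j

-- forward scan 'for j, ch in enumerate(tail): if ch in marks: right = offset + j; break'
def pvFirstMark : List Char → Nat → Option Nat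
  | [], _ => none
  | ch :: rest, j => if ch ∈ ['.', '\n', ';'] then some j else pvFirstMark rest (j + 1)

def sentence_around_py_alt (text : String) (start : Int) (end_ : Int) : String :=
  let n : Int := PySem.Str.len text
  let pre := PySem.Str.slice text none (some start)
  let left := pvScanL pre.toList pre.toList.length
  let tail := PySem.Str.slice text (some end_) none
  let offset : Int := n - PySem.Str.len tail
  let right := match pvFirstMark tail.toList 0 with
               | some j => offset + (j : Int)
               | none => min n (end_ + 500)
  pvCleanQuote (PySem.Str.slice text (some (left + 1)) (some (right + 1)))

-- ===== PRECONDITION & SPEC =====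
def Spec_sentence_around_py (text : String) (start : Int) (end_ : Int) (out : String) : Prop := out = sentence_around_py_alt text start end_
instance (text : String) (start : Int) (end_ : Int) (out : String) : Decidable (Spec_sentence_around_py text start end_ out) := by unfold Spec_sentence_around_py; infer_instance

-- ===== CLAIM (what is proved, stated in full; the proofs are below) =====
def Claim_equal_sentence_around_py : Prop := ∀ (text : String) (start : Int) (end_ : Int), Dom_sentence_around_py text start end_ → Spec_sentence_around_py text start end_ (sentence_around_py text start end_)

-- ===== LEMMAS AND PROOFS =====

-- the common slice-bound clamp (rfind/find read their bounds like slice bounds)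
def pvClampIdx (x : Int) (n : Nat) : Nat :=
  (if (n : Int) < x then (n : Int) else if x < 0 then (if x + n < 0 then 0 else x + n) else x).toNat

def pvStClamp (x : Int) (n : Nat) : Int :=
  if x < 0 then (if x + (n : Int) < 0 then 0 else x + n) else x

-- proof-side combined scan carrying the absolute start index
def pvScanR : List Char → Nat → Option Int
  | [], _ => none
  | ch :: rest, i => if ch ∈ ['.', '\n', ';'] then some (i : Int) else pvScanR rest (i + 1)

theorem pvClampIdx_le (x : Int) (n : Nat) : pvClampIdx x n ≤ n := by
  unfold pvClampIdx; split_ifs <;> omega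

theorem pvClampIdx_eq_clampIdx (x : Int) (n : Nat) :
    PySem.List.clampIdx n x = pvClampIdx x n := by
  simp only [PySem.List.clampIdx, pvClampIdx]; split_ifs <;> omega

theorem pv_prefix_single (c h : Char) (l : List Char) :
    ([c].isPrefixOf (h :: l)) = (c == h) := by
  simp [List.isPrefixOf]

theorem pv_rfind_nil (c : Char) : PySem.Chars.rfind [] [c] = -1 := by
  simp [PySem.Chars.rfind, PySem.Chars.rfind.go, List.isPrefixOf]

theorem pv_rfind_go_le (s : List Char) (c : Char) (k : Nat) :
    PySem.Chars.rfind.go s [c] k ≤ (k : Int) := by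
  induction k with
  | zero => simp only [PySem.Chars.rfind.go]; split <;> simp
  | succ j ih =>
      simp only [PySem.Chars.rfind.go] at ih ⊢
      split <;> push_cast <;> omega

theorem pv_rfind_lt (s : List Char) (c : Char) :
    PySem.Chars.rfind s [c] < (s.length : Int) := by
  unfold PySem.Chars.rfind
  cases hs : s.length with
  | zero =>
      have : s = [] := List.eq_nil_of_length_eq_zero hs
      subst this
      simp [PySem.Chars.rfind.go, List.isPrefixOf]
  | succ m =>
      simp only [PySem.Chars.rfind.go]
      have hdrop : s.drop (m+1) = [] := by
        apply List.drop_eq_nil_of_le; omega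
      rw [hdrop]
      have : ([c].isPrefixOf ([] : List Char)) = false := by simp [List.isPrefixOf]
      rw [this]
      simp only [Bool.false_eq_true, if_false]
      have := pv_rfind_go_le s c m
      push_cast
      omega

theorem pv_go_append (s : List Char) (a c : Char) (k : Nat) (hk : k < s.length) :
    PySem.Chars.rfind.go (s ++ [a]) [c] k = PySem.Chars.rfind.go s [c] k := by
  induction k with
  | zero =>
      simp only [PySem.Chars.rfind.go]
      cases s with
      | nil => simp at hk
      | cons h t => simp [pv_prefix_single]
  | succ j ih =>
      simp only [PySem.Chars.rfind.go]
      have hd : (s ++ [a]).drop (j+1) = s.drop (j+1) ++ [a] := by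
        rw [List.drop_append_of_le_length (by omega)]
      rw [hd]
      cases hdr : s.drop (j+1) with
      | nil => exfalso; have := List.length_drop (l := s) (i := j+1); rw [hdr] at this; simp at this; omega
      | cons h t =>
          simp only [List.cons_append, pv_prefix_single]
          rw [ih (by omega)]

theorem pv_rfind_append (s : List Char) (a c : Char) :
    PySem.Chars.rfind (s ++ [a]) [c] = if a = c then (s.length : Int) else PySem.Chars.rfind s [c] := by
  unfold PySem.Chars.rfind
  have hlen : (s ++ [a]).length = s.length + 1 := by simp
  rw [hlen]
  have h1 : PySem.Chars.rfind.go (s ++ [a]) [c] (s.length + 1)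
      = PySem.Chars.rfind.go (s ++ [a]) [c] s.length := by
    simp only [PySem.Chars.rfind.go]
    have : (s ++ [a]).drop (s.length + 1) = [] := by
      apply List.drop_eq_nil_of_le; simp
    rw [this]
    simp [List.isPrefixOf]
  rw [h1]
  cases s with
  | nil =>
      simp only [List.nil_append, List.length_nil, PySem.Chars.rfind.go, pv_prefix_single]
      by_cases hac : a = c
      · subst hac; simp
      · have hca : (c == a) = false := beq_eq_false_iff_ne.mpr (fun h => hac h.symm)
        simp [hca, hac]
  | cons h t =>
      have hlen2 : (h :: t).length = t.length + 1 := by simp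
      rw [hlen2]
      simp only [PySem.Chars.rfind.go]
      have hd1 : ((h :: t) ++ [a]).drop (t.length + 1) = [a] := by
        have he1 : ((h :: t) ++ [a]).drop (t.length + 1) = List.drop (t.length + 1) (h :: t) ++ [a] := by
          rw [List.drop_append_of_le_length (by simp)]
        rw [he1]
        have : List.drop (t.length + 1) (h :: t) = [] := by
          apply List.drop_eq_nil_of_le; simp
        rw [this]; simp
      have hd2 : (h :: t).drop (t.length + 1) = [] := by
        apply List.drop_eq_nil_of_le; simp
      rw [hd1, hd2, pv_prefix_single]
      have hnil : ([c].isPrefixOf ([] : List Char)) = false := by simp [List.isPrefixOf]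
      rw [hnil]
      simp only [Bool.false_eq_true, if_false]
      by_cases hac : a = c
      · subst hac; simp
      · have hca : (c == a) = false := beq_eq_false_iff_ne.mpr (fun h => hac h.symm)
        rw [hca]
        simp only [Bool.false_eq_true, if_false, if_neg hac]
        exact pv_go_append (h :: t) a c t.length (by simp)

theorem pv_find_nil (c : Char) : PySem.Chars.find [] [c] = -1 := by
  simp [PySem.Chars.find, PySem.Chars.find.go, List.isEmpty]

theorem pv_find_go_ge (c : Char) (l : List Char) (k : Nat) :
    PySem.Chars.find.go [c] l k = -1 ∨ (k : Int) ≤ PySem.Chars.find.go [c] l k := by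
  induction l generalizing k with
  | nil => left; simp [PySem.Chars.find.go, List.isEmpty]
  | cons h t ih =>
      simp only [PySem.Chars.find.go]
      split
      · right; omega
      · rcases ih (k+1) with h1 | h1
        · left; exact h1
        · right; push_cast at h1 ⊢; omega

theorem pv_find_nonneg_or (l : List Char) (c : Char) :
    PySem.Chars.find l [c] = -1 ∨ 0 ≤ PySem.Chars.find l [c] := by
  have := pv_find_go_ge c l 0
  simpa [PySem.Chars.find] using this

theorem pv_find_go_shift (c : Char) (l : List Char) (k : Nat) :
    PySem.Chars.find.go [c] l k =
      if PySem.Chars.find l [c] = -1 then -1 else (k : Int) + PySem.Chars.find l [c] := by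
  induction l generalizing k with
  | nil => simp [PySem.Chars.find, PySem.Chars.find.go, List.isEmpty]
  | cons h t ih =>
      unfold PySem.Chars.find
      simp only [PySem.Chars.find.go, pv_prefix_single]
      have hnn := pv_find_nonneg_or t c
      simp only [PySem.Chars.find] at hnn
      by_cases hch : c = h
      · simp [hch]
      · have hf : (c == h) = false := beq_eq_false_iff_ne.mpr hch
        rw [hf]
        simp only [Bool.false_eq_true, if_false]
        rw [ih (k+1), ih 1]
        simp only [PySem.Chars.find]
        split_ifs <;> push_cast <;> omega

theorem pv_find_cons (ch : Char) (rest : List Char) (c : Char) :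
    PySem.Chars.find (ch :: rest) [c] =
      if c = ch then 0 else (if PySem.Chars.find rest [c] = -1 then -1 else 1 + PySem.Chars.find rest [c]) := by
  unfold PySem.Chars.find
  simp only [PySem.Chars.find.go, pv_prefix_single]
  by_cases hch : c = ch
  · simp [hch]
  · have hf : (c == ch) = false := beq_eq_false_iff_ne.mpr hch
    rw [hf]
    simp only [Bool.false_eq_true, if_false, if_neg hch]
    rw [pv_find_go_shift]
    simp [PySem.Chars.find]

theorem pv_max4 (a b c d : Int) :
    (PySem.List.max? [a,b,c,d] id).getD 0 = max (max (max a b) c) d := by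
  simp only [PySem.List.max?, List.foldl, id]
  split_ifs <;> simp_all <;> (try split_ifs <;> simp_all) <;> (try split_ifs <;> simp_all) <;> omega

theorem pv_min3 (a b c : Int) :
    (PySem.List.min? [a,b,c] id) = some (min (min a b) c) := by
  simp only [PySem.List.min?, List.foldl, id]
  split_ifs <;> simp_all <;> (try split_ifs <;> simp_all) <;> omega

theorem pv_min2 (a b : Int) : (PySem.List.min? [a,b] id) = some (min a b) := by
  simp only [PySem.List.min?, List.foldl]
  split_ifs <;> simp_all <;> omega

theorem pv_min1 (a : Int) : (PySem.List.min? [a] id) = some a := by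
  simp [PySem.List.min?, List.foldl]

theorem pv_min0 : (PySem.List.min? ([] : List Int) id) = none := by
  simp [PySem.List.min?, List.foldl]

theorem pv_rfindFrom_zero (cs : List Char) (c : Char) (start : Int) :
    PySem.Chars.rfindFrom cs [c] 0 (some start) = PySem.Chars.rfind (cs.take (pvClampIdx start cs.length)) [c] := by
  simp only [PySem.Chars.rfindFrom, pvClampIdx]
  have h0 : (if (0:Int) < 0 then if 0 + (cs.length:Int) < 0 then 0 else 0 + (cs.length:Int) else 0) = 0 := by norm_num
  simp only [h0]
  generalize hE : (if (cs.length:Int) < start then (cs.length:Int) else if start < 0 then if start + (cs.length:Int) < 0 then 0 else start + (cs.length:Int) else start) = E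
  have hE0 : 0 ≤ E := by rw [← hE]; split_ifs <;> omega
  rw [if_neg (by omega : ¬ E < (0:Int))]
  simp only [Int.toNat_zero, List.drop_zero]
  split_ifs with h
  · exact h.symm
  · omega

theorem pv_findFrom_none (cs : List Char) (c : Char) (end_ : Int) :
    PySem.Chars.findFrom cs [c] end_ none =
      (if (cs.length : Int) < pvStClamp end_ cs.length then -1
       else (if PySem.Chars.find (cs.drop (pvStClamp end_ cs.length).toNat) [c] = -1 then -1
             else pvStClamp end_ cs.length + PySem.Chars.find (cs.drop (pvStClamp end_ cs.length).toNat) [c])) := by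
  simp only [PySem.Chars.findFrom, pvStClamp, Int.toNat_natCast, List.take_length]

-- LEFT: max of the four single-char rfinds over the prefix = the combined downward scan
theorem pv_left_eq (cs : List Char) (e : Nat) (he : e ≤ cs.length) :
    (PySem.List.max? [PySem.Chars.rfind (cs.take e) ['.'],
                      PySem.Chars.rfind (cs.take e) ['\n'],
                      PySem.Chars.rfind (cs.take e) [';'],
                      PySem.Chars.rfind (cs.take e) ['\u2022']] id).getD 0 = pvScanL cs e := by
  induction e with
  | zero =>
      simp [pv_rfind_nil, pvScanL, PySem.List.max?]
  | succ e ih =>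
      have hel : e < cs.length := by omega
      have hlt : (cs.take e).length = e := by simp [List.length_take]; omega
      have ht : cs.take (e+1) = cs.take e ++ [cs[e]] := by
        rw [List.take_add_one]
        simp [List.getElem?_eq_getElem hel]
      have hgd : cs.getD e ' ' = cs[e] := List.getD_eq_getElem cs ' ' hel
      have h1 := pv_rfind_lt (cs.take e) '.'
      have h2 := pv_rfind_lt (cs.take e) '\n'
      have h3 := pv_rfind_lt (cs.take e) ';'
      have h4 := pv_rfind_lt (cs.take e) '\u2022'
      rw [hlt] at h1 h2 h3 h4
      rw [ht, pv_rfind_append, pv_rfind_append, pv_rfind_append, pv_rfind_append, hlt]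
      rw [show pvScanL cs (e+1) = if cs.getD e ' ' ∈ ['.', '\n', ';', '\u2022'] then (e : Int) else pvScanL cs e from rfl]
      rw [hgd]
      rw [← ih (by omega)]
      rw [pv_max4, pv_max4]
      simp only [List.mem_cons, List.not_mem_nil]
      by_cases hx1 : cs[e] = '.' <;> by_cases hx2 : cs[e] = '\n' <;>
        by_cases hx3 : cs[e] = ';' <;> by_cases hx4 : cs[e] = '\u2022' <;>
        simp only [hx1, hx2, hx3, hx4] <;> simp_all <;> omega

-- RIGHT: min of the surviving single-char finds = the combined upward scan
theorem pv_right_eq (l : List Char) (i : Nat) :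
    pvScanR l i =
      (match PySem.List.min? (([PySem.Chars.find l ['.'], PySem.Chars.find l ['\n'], PySem.Chars.find l [';']]).filter (fun p => p ≠ -1)) id with
       | some r => some ((i : Int) + r)
       | none => none) := by
  induction l generalizing i with
  | nil => simp [pvScanR, pv_find_nil, pv_min0]
  | cons ch rest ih =>
      have hnn1 := pv_find_nonneg_or rest '.'
      have hnn2 := pv_find_nonneg_or rest '\n'
      have hnn3 := pv_find_nonneg_or rest ';'
      rw [show pvScanR (ch :: rest) i = if ch ∈ ['.', '\n', ';'] then some (i : Int) else pvScanR rest (i + 1) from rfl]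
      rw [pv_find_cons, pv_find_cons, pv_find_cons]
      by_cases hx1 : ch = '.'
      · subst hx1
        simp only [List.mem_cons, List.not_mem_nil]
        rcases hnn2 with h2 | h2 <;> rcases hnn3 with h3 | h3 <;>
          [skip; (have m3 : PySem.Chars.find rest [';'] ≠ -1 := by omega);
           (have m2 : PySem.Chars.find rest ['\n'] ≠ -1 := by omega);
           (have m2 : PySem.Chars.find rest ['\n'] ≠ -1 := by omega;
            have m3 : PySem.Chars.find rest [';'] ≠ -1 := by omega)] <;>
          have k2 : (1 : Int) + PySem.Chars.find rest ['\n'] ≠ -1 := by omega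
        all_goals have k3 : (1 : Int) + PySem.Chars.find rest [';'] ≠ -1 := by omega
        all_goals simp_all [List.filter_cons, List.filter_nil, pv_min0, pv_min1, pv_min2, pv_min3]
        all_goals omega
      · by_cases hx2 : ch = '\n'
        · subst hx2
          simp only [List.mem_cons, List.not_mem_nil]
          rcases hnn1 with h1 | h1 <;> rcases hnn3 with h3 | h3 <;>
            [skip; (have m3 : PySem.Chars.find rest [';'] ≠ -1 := by omega);
             (have m1 : PySem.Chars.find rest ['.'] ≠ -1 := by omega);
             (have m1 : PySem.Chars.find rest ['.'] ≠ -1 := by omega;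
              have m3 : PySem.Chars.find rest [';'] ≠ -1 := by omega)] <;>
            have k1 : (1 : Int) + PySem.Chars.find rest ['.'] ≠ -1 := by omega
          all_goals have k3 : (1 : Int) + PySem.Chars.find rest [';'] ≠ -1 := by omega
          all_goals simp_all [List.filter_cons, List.filter_nil, pv_min0, pv_min1, pv_min2, pv_min3]
          all_goals omega
        · by_cases hx3 : ch = ';'
          · subst hx3
            simp only [List.mem_cons, List.not_mem_nil]
            rcases hnn1 with h1 | h1 <;> rcases hnn2 with h2 | h2 <;>
              [skip; (have m2 : PySem.Chars.find rest ['\n'] ≠ -1 := by omega);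
               (have m1 : PySem.Chars.find rest ['.'] ≠ -1 := by omega);
               (have m1 : PySem.Chars.find rest ['.'] ≠ -1 := by omega;
                have m2 : PySem.Chars.find rest ['\n'] ≠ -1 := by omega)] <;>
              have k1 : (1 : Int) + PySem.Chars.find rest ['.'] ≠ -1 := by omega
            all_goals have k2 : (1 : Int) + PySem.Chars.find rest ['\n'] ≠ -1 := by omega
            all_goals simp_all [List.filter_cons, List.filter_nil, pv_min0, pv_min1, pv_min2, pv_min3]
            all_goals omega
          · have hmem : ch ∉ (['.', '\n', ';'] : List Char) := by simp [hx1, hx2, hx3]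
            rw [if_neg hmem, ih (i+1)]
            have hne1 : ('.' : Char) ≠ ch := fun h => hx1 h.symm
            have hne2 : ('\n' : Char) ≠ ch := fun h => hx2 h.symm
            have hne3 : (';' : Char) ≠ ch := fun h => hx3 h.symm
            rw [if_neg hne1, if_neg hne2, if_neg hne3]
            rcases hnn1 with h1 | h1 <;> rcases hnn2 with h2 | h2 <;> rcases hnn3 with h3 | h3 <;>
              [skip;
               (have m3 : PySem.Chars.find rest [';'] ≠ -1 := by omega);
               (have m2 : PySem.Chars.find rest ['\n'] ≠ -1 := by omega);
               (have m2 : PySem.Chars.find rest ['\n'] ≠ -1 := by omega;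
                have m3 : PySem.Chars.find rest [';'] ≠ -1 := by omega);
               (have m1 : PySem.Chars.find rest ['.'] ≠ -1 := by omega);
               (have m1 : PySem.Chars.find rest ['.'] ≠ -1 := by omega;
                have m3 : PySem.Chars.find rest [';'] ≠ -1 := by omega);
               (have m1 : PySem.Chars.find rest ['.'] ≠ -1 := by omega;
                have m2 : PySem.Chars.find rest ['\n'] ≠ -1 := by omega);
               (have m1 : PySem.Chars.find rest ['.'] ≠ -1 := by omega;
                have m2 : PySem.Chars.find rest ['\n'] ≠ -1 := by omega;
                have m3 : PySem.Chars.find rest [';'] ≠ -1 := by omega)] <;>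
              have k1 : (1 : Int) + PySem.Chars.find rest ['.'] ≠ -1 := by omega
            all_goals have k2 : (1 : Int) + PySem.Chars.find rest ['\n'] ≠ -1 := by omega
            all_goals have k3 : (1 : Int) + PySem.Chars.find rest [';'] ≠ -1 := by omega
            all_goals simp_all [List.filter_cons, List.filter_nil, pv_min0, pv_min1, pv_min2, pv_min3]
            all_goals omega

-- the backward scan only reads indices below its counter, so a long-enough prefix is interchangeable
theorem pvScanL_take (cs : List Char) (e j : Nat) (hj : j ≤ e) :
    pvScanL (cs.take e) j = pvScanL cs j := by
  induction j with
  | zero => rfl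
  | succ i ih =>
      show (if (cs.take e).getD i ' ' ∈ _ then _ else pvScanL (cs.take e) i)
         = (if cs.getD i ' ' ∈ _ then _ else pvScanL cs i)
      have hg : (cs.take e).getD i ' ' = cs.getD i ' ' := by
        simp [List.getD, List.getElem?_take, Nat.lt_of_lt_of_le (Nat.lt_succ_self i) hj]
      rw [hg, ih (by omega)]

theorem pvFirstMark_succ (l : List Char) (j : Nat) :
    pvFirstMark l (j + 1) = (pvFirstMark l j).map (· + 1) := by
  induction l generalizing j with
  | nil => rfl
  | cons ch rest ih =>
      show (if ch ∈ _ then some (j+1) else pvFirstMark rest (j+2))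
         = ((if ch ∈ _ then some j else pvFirstMark rest (j+1)).map (· + 1))
      by_cases h : ch ∈ (['.', '\n', ';'] : List Char)
      · simp [h]
      · simp only [if_neg h]
        rw [ih (j+1)]

theorem pvScanR_firstMark (l : List Char) (i : Nat) :
    pvScanR l i = (pvFirstMark l 0).map (fun j => (i : Int) + j) := by
  induction l generalizing i with
  | nil => rfl
  | cons ch rest ih =>
      show (if ch ∈ _ then some ((i:Nat) : Int) else pvScanR rest (i+1))
         = ((if ch ∈ _ then some 0 else pvFirstMark rest 1).map (fun j => (i : Int) + j))
      by_cases h : ch ∈ (['.', '\n', ';'] : List Char)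
      · simp [h]
      · simp only [if_neg h]
        rw [ih (i+1), show (1 : Nat) = 0 + 1 from rfl, pvFirstMark_succ]
        cases pvFirstMark rest 0 <;> simp <;> push_cast <;> omega

-- ===== VERDICT (by name: the statement is the Claim_ definition above) =====
theorem sentence_around_py_spec : Claim_equal_sentence_around_py := by
  intro text start end_ _
  unfold Spec_sentence_around_py
  unfold sentence_around_py sentence_around_py_alt
  dsimp only
  simp only [List.map]
  have hlen : PySem.Str.len text = (text.toList.length : Int) := by
    simp [PySem.Str.len]
  have hbridge : ∀ a b, (PySem.Str.slice text a b).toList = PySem.List.slice text.toList a b := by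
    intro a b; simp [PySem.Str.slice]
  -- both left values equal pvScanL text.toList (pvClampIdx start len)
  set cs := text.toList with hcs
  set K : Nat := pvClampIdx start cs.length with hK
  have hKle : K ≤ cs.length := pvClampIdx_le start cs.length
  have hA_left : (PySem.List.max?
                  [PySem.Str.rfindFrom text "." 0 (some start), PySem.Str.rfindFrom text "\n" 0 (some start),
                    PySem.Str.rfindFrom text ";" 0 (some start), PySem.Str.rfindFrom text "\u2022" 0 (some start)]
                  id).getD 0 = pvScanL cs K := by
    simp only [PySem.Str.rfindFrom,
      show ("." : String).toList = ['.'] from rfl,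
      show ("\n" : String).toList = ['\n'] from rfl,
      show (";" : String).toList = [';'] from rfl,
      show ("\u2022" : String).toList = ['\u2022'] from rfl,
      pv_rfindFrom_zero]
    exact pv_left_eq cs K hKle
  have hpref : (PySem.Str.slice text none (some start)).toList = cs.take K := by
    rw [hbridge]
    rw [show PySem.List.slice text.toList none (some start)
          = List.take (PySem.List.clampIdx text.toList.length start) text.toList by
        simp [PySem.List.slice], pvClampIdx_eq_clampIdx]
  have hpreflen : (PySem.Str.slice text none (some start)).toList.length = K := by
    rw [hpref]; simp [List.length_take]; omega
  have hB_left : pvScanL (PySem.Str.slice text none (some start)).toList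
      (PySem.Str.slice text none (some start)).toList.length = pvScanL cs K := by
    rw [hpreflen, hpref, pvScanL_take cs K K (le_refl K)]
  rw [hA_left, hB_left]
  -- both right values equal the combined forward scan from E := pvClampIdx end_ len
  set E : Nat := pvClampIdx end_ cs.length with hE
  have hEle : E ≤ cs.length := pvClampIdx_le end_ cs.length
  have htail : (PySem.Str.slice text (some end_) none).toList = cs.drop E := by
    rw [hbridge, PySem.List.slice_some_none, pvClampIdx_eq_clampIdx]
  have htaillen : PySem.Str.len (PySem.Str.slice text (some end_) none) = ((cs.length - E : Nat) : Int) := by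
    have h1 : (PySem.Str.slice text (some end_) none).toList.length = cs.length - E := by
      rw [htail]; simp
    rw [show PySem.Str.len (PySem.Str.slice text (some end_) none)
          = (((PySem.Str.slice text (some end_) none).toList.length : Nat) : Int) by
        simp [PySem.Str.len], h1]
  have hoffset : PySem.Str.len text - PySem.Str.len (PySem.Str.slice text (some end_) none) = (E : Int) := by
    rw [hlen, htaillen]; push_cast; omega
  have hB_right : (match pvFirstMark (PySem.Str.slice text (some end_) none).toList 0 with
        | some j => PySem.Str.len text - PySem.Str.len (PySem.Str.slice text (some end_) none) + (j : Int)
        | none => min (PySem.Str.len text) (end_ + 500))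
      = (match pvScanR (cs.drop E) E with
        | some r => r
        | none => min ((cs.length : Int)) (end_ + 500)) := by
    rw [htail, pvScanR_firstMark (cs.drop E) E, hoffset, hlen]
    cases pvFirstMark (cs.drop E) 0 <;> simp
  have hA_right : (match
        PySem.List.min?
          (List.filter (fun p => decide (p ≠ -1))
            [PySem.Str.findFrom text "." end_, PySem.Str.findFrom text "\n" end_, PySem.Str.findFrom text ";" end_])
          id with
      | some r => r
      | none => min (PySem.Str.len text) (end_ + 500))
    = (match pvScanR (cs.drop E) E with
        | some r => r
        | none => min ((cs.length : Int)) (end_ + 500)) := by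
    simp only [PySem.Str.findFrom,
      show ("." : String).toList = ['.'] from rfl,
      show ("\n" : String).toList = ['\n'] from rfl,
      show (";" : String).toList = [';'] from rfl,
      pv_findFrom_none, hlen]
    simp only [← hcs]
    set st := pvStClamp end_ cs.length with hst
    have h0st : 0 ≤ st := by rw [hst]; unfold pvStClamp; split_ifs <;> omega
    by_cases hov : (cs.length:Int) < st
    · simp only [if_pos hov]
      have hEn : E = cs.length := by
        rw [hE]; rw [hst] at hov; unfold pvStClamp at hov; unfold pvClampIdx; split_ifs at hov ⊢ <;> omega
      rw [hEn, List.drop_length]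
      simp [pv_min0, pvScanR]
    · simp only [if_neg hov]
      have hstE : st.toNat = E := by
        rw [hE, hst] at *; unfold pvStClamp at hov ⊢; unfold pvClampIdx; split_ifs at hov ⊢ <;> omega
      have hstE' : st = (E : Int) := by omega
      rw [hstE, hstE']
      rw [pv_right_eq (cs.drop E) E]
      have hnn1 := pv_find_nonneg_or (cs.drop E) '.'
      have hnn2 := pv_find_nonneg_or (cs.drop E) '\n'
      have hnn3 := pv_find_nonneg_or (cs.drop E) ';'
      rcases hnn1 with h1 | h1 <;> rcases hnn2 with h2 | h2 <;> rcases hnn3 with h3 | h3 <;>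
        (try have m1 : PySem.Chars.find (cs.drop E) ['.'] ≠ -1 := by omega) <;>
        (try have m2 : PySem.Chars.find (cs.drop E) ['\n'] ≠ -1 := by omega) <;>
        (try have m3 : PySem.Chars.find (cs.drop E) [';'] ≠ -1 := by omega) <;>
        (try have k1 : (E : Int) + PySem.Chars.find (cs.drop E) ['.'] ≠ -1 := by omega) <;>
        (try have k2 : (E : Int) + PySem.Chars.find (cs.drop E) ['\n'] ≠ -1 := by omega) <;>
        (try have k3 : (E : Int) + PySem.Chars.find (cs.drop E) [';'] ≠ -1 := by omega) <;>
        simp_all [List.filter_cons, List.filter_nil, pv_min0, pv_min1, pv_min2, pv_min3] <;>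
        omega
  rw [hA_right, hB_right]
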